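-- pv_equiv track=rewrite | github.com/enerone/listing_maker | backups/agents_removed_20250719/improved_image_search_agent.py | _get_product_specific_terms
-- ===== SOURCE A (Python) =====
-- from typing import Dict, Any, List, Optional
--
-- def _get_product_specific_terms(product_name: str, category: str) -> List[str]:
--     """
--     Obtiene términos específicos según el tipo de producto.
--     """
--     terms = []
--     product_lower = product_name.lower()
--     category_lower = category.lower()
--
--     # Smartwatch/Reloj inteligente
--     if any(keyword in product_lower for keyword in ['watch', 'smartwatch', 'reloj']):
--         terms.extend([
--             f"{product_name} wearable",
--             f"{product_name} fitness tracker",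
--             f"{product_name} smartwatch",
--             f"{product_name} wrist device"
--         ])
--
--     # Sillas
--     elif any(keyword in product_lower for keyword in ['chair', 'silla', 'seat']):
--         terms.extend([
--             f"{product_name} furniture",
--             f"{product_name} office chair",
--             f"{product_name} gaming chair",
--             f"{product_name} ergonomic"
--         ])
--
--     # Termos y botellas
--     elif any(keyword in product_lower for keyword in ['bottle', 'termo', 'flask', 'tumbler']):
--         terms.extend([
--             f"{product_name} water bottle",
--             f"{product_name} insulated bottle",
--             f"{product_name} steel bottle",
--             f"{product_name} drinkware"
--         ])
--
--     # Electrónicos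
--     elif 'electronic' in category_lower or any(keyword in product_lower for keyword in ['device', 'gadget', 'tech']):
--         terms.extend([
--             f"{product_name} electronic device",
--             f"{product_name} gadget",
--             f"{product_name} technology"
--         ])
--
--     # Productos de cocina
--     elif 'kitchen' in category_lower or any(keyword in product_lower for keyword in ['kitchen', 'cooking', 'cocina']):
--         terms.extend([
--             f"{product_name} kitchen appliance",
--             f"{product_name} cooking utensil",
--             f"{product_name} kitchen gadget"
--         ])
--
--     return terms
-- ===== SOURCE B (Python) =====
-- # Dictionary-matching rewrite: instead of testing each keyword with `in` inside
-- # an if/elif chain, sweep each text once and hash every candidate-length window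
-- # into a keyword->rule-index map, keeping the minimum (= highest-priority) rule.
-- _RULE_SUFFIXES = [
--     [" wearable", " fitness tracker", " smartwatch", " wrist device"],
--     [" furniture", " office chair", " gaming chair", " ergonomic"],
--     [" water bottle", " insulated bottle", " steel bottle", " drinkware"],
--     [" electronic device", " gadget", " technology"],
--     [" kitchen appliance", " cooking utensil", " kitchen gadget"],
-- ]
-- _PRODUCT_KW = {
--     "watch": 0, "smartwatch": 0, "reloj": 0,
--     "chair": 1, "silla": 1, "seat": 1,
--     "bottle": 2, "termo": 2, "flask": 2, "tumbler": 2,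
--     "device": 3, "gadget": 3, "tech": 3,
--     "kitchen": 4, "cooking": 4, "cocina": 4,
-- }
-- _CATEGORY_KW = {"electronic": 3, "kitchen": 4}
-- _PRODUCT_LENS = sorted({len(k) for k in _PRODUCT_KW})
-- _CATEGORY_LENS = sorted({len(k) for k in _CATEGORY_KW})
--
-- def _scan(text, table, lens, best):
--     n = len(text)
--     for i in range(n):
--         for L in lens:
--             if i + L <= n:
--                 r = table.get(text[i:i+L])
--                 if r is not None and (best is None or r < best):
--                     best = r
--     return best
--
-- def _get_product_specific_terms(product_name: str, category: str):
--     best = _scan(product_name.lower(), _PRODUCT_KW, _PRODUCT_LENS, None)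
--     best = _scan(category.lower(), _CATEGORY_KW, _CATEGORY_LENS, best)
--     if best is None:
--         return []
--     return [product_name + s for s in _RULE_SUFFIXES[best]]
-- ===== Notes on version B (the rewrite author's own statement) =====
-- stated objective: alternative
-- what changed: Replaces the if/elif chain of per-keyword 'in' substring tests by a dictionary-matching sweep: each text is scanned once and every candidate-length window is hashed into a keyword-to-rule-priority map, keeping the minimum priority; the winning rule's suffixes are then formatted.
import Mathlib
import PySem

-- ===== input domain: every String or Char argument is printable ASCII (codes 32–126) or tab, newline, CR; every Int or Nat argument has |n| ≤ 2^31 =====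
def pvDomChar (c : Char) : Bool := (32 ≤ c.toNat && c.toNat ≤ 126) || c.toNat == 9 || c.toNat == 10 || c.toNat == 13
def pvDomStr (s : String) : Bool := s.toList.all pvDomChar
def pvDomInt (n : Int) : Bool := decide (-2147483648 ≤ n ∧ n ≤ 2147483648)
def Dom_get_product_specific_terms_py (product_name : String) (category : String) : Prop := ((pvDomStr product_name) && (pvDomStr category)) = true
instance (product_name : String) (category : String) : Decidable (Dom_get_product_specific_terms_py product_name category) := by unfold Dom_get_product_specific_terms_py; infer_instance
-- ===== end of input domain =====

-- B replaces A's if/elif chain of per-keyword `in` tests by a dictionary-matching sweep: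
-- every candidate-length window of each text is hashed into a keyword→rule-priority map
-- and the minimum priority wins (objective: alternative algorithm, same exact result).

-- ===== PORT A =====
def get_product_specific_terms_py (product_name : String) (category : String) : List String :=
  let terms : List String := []
  let product_lower := PySem.Str.lower product_name
  let category_lower := PySem.Str.lower category
  if (["watch", "smartwatch", "reloj"].any (fun k => PySem.Str.isIn k product_lower)) then
    terms ++ [product_name ++ " wearable", product_name ++ " fitness tracker",
              product_name ++ " smartwatch", product_name ++ " wrist device"]
  else if (["chair", "silla", "seat"].any (fun k => PySem.Str.isIn k product_lower)) then
    terms ++ [product_name ++ " furniture", product_name ++ " office chair",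
              product_name ++ " gaming chair", product_name ++ " ergonomic"]
  else if (["bottle", "termo", "flask", "tumbler"].any (fun k => PySem.Str.isIn k product_lower)) then
    terms ++ [product_name ++ " water bottle", product_name ++ " insulated bottle",
              product_name ++ " steel bottle", product_name ++ " drinkware"]
  else if (PySem.Str.isIn "electronic" category_lower ||
           ["device", "gadget", "tech"].any (fun k => PySem.Str.isIn k product_lower)) then
    terms ++ [product_name ++ " electronic device", product_name ++ " gadget",
              product_name ++ " technology"]
  else if (PySem.Str.isIn "kitchen" category_lower ||
           ["kitchen", "cooking", "cocina"].any (fun k => PySem.Str.isIn k product_lower)) then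
    terms ++ [product_name ++ " kitchen appliance", product_name ++ " cooking utensil",
              product_name ++ " kitchen gadget"]
  else
    terms

-- ===== PORT B =====
-- (strings are carried as their code-point lists, the exact representation PySem.Chars defines)
def pvRuleSuffixes : List (List String) :=
  [[" wearable", " fitness tracker", " smartwatch", " wrist device"],
   [" furniture", " office chair", " gaming chair", " ergonomic"],
   [" water bottle", " insulated bottle", " steel bottle", " drinkware"],
   [" electronic device", " gadget", " technology"],
   [" kitchen appliance", " cooking utensil", " kitchen gadget"]]

def pvProductItems : List (List Char × Nat) :=
  [("watch".toList, 0), ("smartwatch".toList, 0), ("reloj".toList, 0),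
   ("chair".toList, 1), ("silla".toList, 1), ("seat".toList, 1),
   ("bottle".toList, 2), ("termo".toList, 2), ("flask".toList, 2), ("tumbler".toList, 2),
   ("device".toList, 3), ("gadget".toList, 3), ("tech".toList, 3),
   ("kitchen".toList, 4), ("cooking".toList, 4), ("cocina".toList, 4)]

def pvCategoryItems : List (List Char × Nat) :=
  [("electronic".toList, 3), ("kitchen".toList, 4)]

def pvProductKW : PySem.Dict (List Char) Nat := PySem.Dict.ofList pvProductItems
def pvCategoryKW : PySem.Dict (List Char) Nat := PySem.Dict.ofList pvCategoryItems

-- the sorted distinct keyword lengths of each table (module constants in Source B)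
def pvProductLens : List Nat := [4, 5, 6, 7, 10]
def pvCategoryLens : List Nat := [7, 10]

-- one sweep over the text: every window whose length is a keyword length is
-- looked up in the table; the smallest rule index seen so far is kept
def pvScan (text : List Char) (table : PySem.Dict (List Char) Nat) (lens : List Nat)
    (best0 : Option Nat) : Option Nat :=
  let n := text.length
  (List.range n).foldl (fun best i =>
    lens.foldl (fun best L =>
      if i + L ≤ n then
        match table.get? (PySem.List.slice text (some (i : Int)) (some ((i : Int) + (L : Int)))) with
        | some r =>
          match best with
          | none => some r
          | some b => if r < b then some r else some b
        | none => best
      else best) best) best0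

def get_product_specific_terms_py_alt (product_name : String) (category : String) : List String :=
  let best₁ := pvScan (PySem.Str.lower product_name).toList pvProductKW pvProductLens none
  let best₂ := pvScan (PySem.Str.lower category).toList pvCategoryKW pvCategoryLens best₁
  match best₂ with
  | none => []
  | some r => (pvRuleSuffixes.getD r []).map (fun s => product_name ++ s)

-- ===== PRECONDITION & SPEC =====
def Spec_get_product_specific_terms_py (product_name : String) (category : String) (out : List String) : Prop := out = get_product_specific_terms_py_alt product_name category
instance (product_name : String) (category : String) (out : List String) : Decidable (Spec_get_product_specific_terms_py product_name category out) := by unfold Spec_get_product_specific_terms_py; infer_instance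

-- ===== CLAIM (what is proved, stated in full; the proofs are below) =====
def Claim_equal_get_product_specific_terms_py : Prop := ∀ (product_name : String) (category : String), Dom_get_product_specific_terms_py product_name category → Spec_get_product_specific_terms_py product_name category (get_product_specific_terms_py product_name category)

-- ===== LEMMAS AND PROOFS =====

-- minimum on Option Nat, `none` the identity
def pvOmin : Option Nat → Option Nat → Option Nat
  | none, b => b
  | some r, none => some r
  | some r, some b => some (min r b)

def pvMinlist (l : List (Option Nat)) : Option Nat := l.foldr pvOmin none

def pvT (b : Bool) (r : Nat) : Option Nat := if b then some r else none

theorem pvOmin_none_left (a : Option Nat) : pvOmin none a = a := rfl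

theorem pvOmin_none_right (a : Option Nat) : pvOmin a none = a := by cases a <;> rfl

theorem pvOmin_comm (a b : Option Nat) : pvOmin a b = pvOmin b a := by
  cases a <;> cases b <;> simp [pvOmin, Nat.min_comm]

theorem pvOmin_assoc (a b c : Option Nat) : pvOmin (pvOmin a b) c = pvOmin a (pvOmin b c) := by
  cases a <;> cases b <;> cases c <;> simp [pvOmin, Nat.min_assoc]

theorem pvOmin_left_comm (a b c : Option Nat) : pvOmin a (pvOmin b c) = pvOmin b (pvOmin a c) := by
  rw [← pvOmin_assoc, pvOmin_comm a b, pvOmin_assoc]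

theorem pvFoldl_omin {α : Type} (f : α → Option Nat) (l : List α) (b : Option Nat) :
    l.foldl (fun b x => pvOmin (f x) b) b = pvOmin (pvMinlist (l.map f)) b := by
  induction l generalizing b with
  | nil => rfl
  | cons x l ih =>
    simp only [List.foldl_cons, List.map_cons, pvMinlist, List.foldr_cons] at *
    rw [ih, pvOmin_left_comm, ← pvOmin_assoc]

theorem pvMinlist_all_none {α : Type} (l : List α) (f : α → Option Nat)
    (h : ∀ x ∈ l, f x = none) : pvMinlist (l.map f) = none := by
  induction l with
  | nil => rfl
  | cons x l ih =>
    simp only [List.map_cons, pvMinlist, List.foldr_cons] at *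
    rw [h x (by simp), ih (fun y hy => h y (by simp [hy]))]
    rfl

theorem pvGet?_minlist (items : List (List Char × Nat))
    (h : (items.map Prod.fst).Nodup) (s : List Char) :
    (PySem.Dict.mk items).get? s
      = pvMinlist (items.map fun p => if p.1 = s then some p.2 else none) := by
  induction items with
  | nil => rfl
  | cons p rest ih =>
    obtain ⟨k, v⟩ := p
    simp only [List.map_cons, List.nodup_cons] at h
    simp only [PySem.Dict.get?_mk_cons, List.map_cons, pvMinlist, List.foldr_cons]
    by_cases hp : k = s
    · have hnone : pvMinlist (rest.map fun q => if q.1 = s then some q.2 else none) = none := by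
        refine pvMinlist_all_none rest _ (fun q hq => ?_)
        have hne : q.1 ≠ s := fun he =>
          h.1 (List.mem_map.mpr ⟨q, hq, he.trans hp.symm⟩)
        simp [hne]
      simp only [pvMinlist] at hnone
      simp [hp, hnone, pvOmin_none_right]
    · have hb : (k == s) = false := by simp [hp]
      simp only [hb, Bool.false_eq_true, if_false, if_neg hp]
      rw [ih h.2]
      rfl

theorem pvIf_omin (c : Prop) [Decidable c] (x y : Option Nat) :
    (if c then pvOmin x y else none) = pvOmin (if c then x else none) (if c then y else none) := by
  split_ifs <;> rfl

theorem pvIf_if (c d : Prop) [Decidable c] [Decidable d] (r : Nat) :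
    (if c then (if d then some r else none) else none) = if c ∧ d then some r else (none : Option Nat) := by
  split_ifs <;> simp_all

theorem pvMinlist_map_omin {α : Type} (p q : α → Option Nat) (l : List α) :
    pvMinlist (l.map fun i => pvOmin (p i) (q i))
      = pvOmin (pvMinlist (l.map p)) (pvMinlist (l.map q)) := by
  induction l with
  | nil => rfl
  | cons x l ih =>
    simp only [List.map_cons, pvMinlist, List.foldr_cons] at *
    rw [ih, pvOmin_assoc, pvOmin_assoc]
    congr 1
    exact pvOmin_left_comm _ _ _

theorem pvMinlist_map_if {α : Type} (P : α → Prop) [DecidablePred P] (r : Nat) (l : List α) :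
    pvMinlist (l.map fun i => if P i then some r else none)
      = if (∃ i ∈ l, P i) then some r else none := by
  induction l with
  | nil => simp [pvMinlist]
  | cons x l ih =>
    simp only [List.map_cons, pvMinlist, List.foldr_cons] at *
    rw [ih]
    by_cases hx : P x <;> by_cases hl : (∃ i ∈ l, P i) <;>
      simp [hx, hl, pvOmin, Nat.min_self]

theorem pvScan_eq (text : List Char) (table : PySem.Dict (List Char) Nat) (lens : List Nat)
    (b : Option Nat) :
    pvScan text table lens b
      = pvOmin (pvMinlist ((List.range text.length).map (fun i =>
          pvMinlist (lens.map (fun L =>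
            if i + L ≤ text.length then
              table.get? (PySem.List.slice text (some (i : Int)) (some ((i : Int) + (L : Int))))
            else none))))) b := by
  unfold pvScan
  have hbody : ∀ (i : Nat) (best : Option Nat) (L : Nat),
      (if i + L ≤ text.length then
        match table.get? (PySem.List.slice text (some (i : Int)) (some ((i : Int) + (L : Int)))) with
        | some r => match best with
                    | none => some r
                    | some b => if r < b then some r else some b
        | none => best
       else best)
      = pvOmin (if i + L ≤ text.length then
          table.get? (PySem.List.slice text (some (i : Int)) (some ((i : Int) + (L : Int))))
          else none) best := by
    intro i best L
    by_cases hg : i + L ≤ text.length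
    · simp only [if_pos hg]
      cases table.get? (PySem.List.slice text (some (i : Int)) (some ((i : Int) + (L : Int)))) with
      | none => cases best <;> rfl
      | some r =>
        cases best with
        | none => rfl
        | some b =>
          simp only [pvOmin]
          split_ifs with h <;> (congr 1; omega)
    · simp only [if_neg hg]; cases best <;> rfl
  have hinner : ∀ (i : Nat) (best : Option Nat),
      lens.foldl (fun best L =>
        if i + L ≤ text.length then
          match table.get? (PySem.List.slice text (some (i : Int)) (some ((i : Int) + (L : Int)))) with
          | some r => match best with
                      | none => some r
                      | some b => if r < b then some r else some b
          | none => best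
        else best) best
      = pvOmin (pvMinlist (lens.map (fun L =>
          if i + L ≤ text.length then
            table.get? (PySem.List.slice text (some (i : Int)) (some ((i : Int) + (L : Int))))
          else none))) best := by
    intro i best
    rw [List.foldl_ext _ _ best (fun a L _ => hbody i a L)]
    exact pvFoldl_omin _ lens best
  rw [List.foldl_ext _ _ b (fun a i _ => hinner i a)]
  exact pvFoldl_omin _ (List.range text.length) b

theorem pvExists_occ_isIn (kw : List Char) (L : Nat) (text : List Char)
    (hL : kw.length = L) (h0 : kw ≠ []) :
    (∃ i ∈ List.range text.length, i + L ≤ text.length ∧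
        kw = PySem.List.slice text (some (i : Int)) (some ((i : Int) + (L : Int))))
      ↔ PySem.Chars.isIn kw text = true := by
  subst hL
  constructor
  · rintro ⟨i, _, _, heq⟩
    rw [PySem.List.slice_natCast_add] at heq
    exact (PySem.Chars.exists_prefix_drop_iff_isIn kw text).mp
      ⟨i, List.prefix_iff_eq_take.mpr heq⟩
  · intro h
    obtain ⟨j, hpref⟩ := (PySem.Chars.exists_prefix_drop_iff_isIn kw text).mpr h
    have hlen : kw.length ≤ text.length - j := by
      have := hpref.length_le
      simpa [List.length_drop] using this
    have hkpos : 0 < kw.length := List.length_pos_iff.mpr h0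
    refine ⟨j, List.mem_range.mpr (by omega), by omega, ?_⟩
    rw [PySem.List.slice_natCast_add]
    exact List.prefix_iff_eq_take.mp hpref

theorem pvExists_occ_ne (kw : List Char) (L : Nat) (text : List Char) (hL : kw.length ≠ L) :
    (∃ i ∈ List.range text.length, i + L ≤ text.length ∧
        kw = PySem.List.slice text (some (i : Int)) (some ((i : Int) + (L : Int)))) ↔ False := by
  constructor
  · rintro ⟨i, _, hle, heq⟩
    rw [PySem.List.slice_natCast_add] at heq
    apply hL
    have := congrArg List.length heq
    simpa [List.length_take, List.length_drop, Nat.min_eq_left (by omega : L ≤ text.length - i)]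
      using this
  · exact False.elim

theorem pvOcc_term_reduce (kw : List Char) (L : Nat) (text : List Char) (r : Nat) (hL : 0 < L) :
    (if (∃ i ∈ List.range text.length, i + L ≤ text.length ∧
          kw = PySem.List.slice text (some (i : Int)) (some ((i : Int) + (L : Int))))
      then some r else none)
    = if kw.length = L then (if PySem.Chars.isIn kw text = true then some r else none)
      else (none : Option Nat) := by
  by_cases hk : kw.length = L
  · have h0 : kw ≠ [] := by
      intro he; rw [he] at hk; simp at hk; omega
    rw [if_pos hk]
    simp only [pvExists_occ_isIn kw L text hk h0]
  · rw [if_neg hk]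
    simp only [pvExists_occ_ne kw L text hk, if_false]

theorem pvGroup2 (a b : Bool) (r : Nat) : pvOmin (pvT a r) (pvT b r) = pvT (a || b) r := by
  cases a <;> cases b <;> simp [pvT, pvOmin, Nat.min_self]

theorem pvMinlist_cons (a : Option Nat) (l : List (Option Nat)) :
    pvMinlist (a :: l) = pvOmin a (pvMinlist l) := rfl

theorem pvMinlist_nil : pvMinlist [] = none := rfl

theorem pvScan_prod_char (t : List Char) (b : Option Nat) :
    pvScan t pvProductKW pvProductLens b
      = pvOmin
          (pvOmin (pvT (PySem.Chars.isIn "watch".toList t) 0)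
          (pvOmin (pvT (PySem.Chars.isIn "smartwatch".toList t) 0)
          (pvOmin (pvT (PySem.Chars.isIn "reloj".toList t) 0)
          (pvOmin (pvT (PySem.Chars.isIn "chair".toList t) 1)
          (pvOmin (pvT (PySem.Chars.isIn "silla".toList t) 1)
          (pvOmin (pvT (PySem.Chars.isIn "seat".toList t) 1)
          (pvOmin (pvT (PySem.Chars.isIn "bottle".toList t) 2)
          (pvOmin (pvT (PySem.Chars.isIn "termo".toList t) 2)
          (pvOmin (pvT (PySem.Chars.isIn "flask".toList t) 2)
          (pvOmin (pvT (PySem.Chars.isIn "tumbler".toList t) 2)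
          (pvOmin (pvT (PySem.Chars.isIn "device".toList t) 3)
          (pvOmin (pvT (PySem.Chars.isIn "gadget".toList t) 3)
          (pvOmin (pvT (PySem.Chars.isIn "tech".toList t) 3)
          (pvOmin (pvT (PySem.Chars.isIn "kitchen".toList t) 4)
          (pvOmin (pvT (PySem.Chars.isIn "cooking".toList t) 4)
                  (pvT (PySem.Chars.isIn "cocina".toList t) 4)))))))))))))))) b := by
  have hku : pvProductKW = PySem.Dict.mk pvProductItems := by decide
  have hget := fun s => pvGet?_minlist pvProductItems (by decide) s
  have h4 := fun kw r => pvOcc_term_reduce kw 4 t r (by norm_num)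
  have h5 := fun kw r => pvOcc_term_reduce kw 5 t r (by norm_num)
  have h6 := fun kw r => pvOcc_term_reduce kw 6 t r (by norm_num)
  have h7 := fun kw r => pvOcc_term_reduce kw 7 t r (by norm_num)
  have h10 := fun kw r => pvOcc_term_reduce kw 10 t r (by norm_num)
  have l1 : ("watch".toList).length = 5 := by decide
  have l2 : ("smartwatch".toList).length = 10 := by decide
  have l3 : ("reloj".toList).length = 5 := by decide
  have l4 : ("chair".toList).length = 5 := by decide
  have l5 : ("silla".toList).length = 5 := by decide
  have l6 : ("seat".toList).length = 4 := by decide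
  have l7 : ("bottle".toList).length = 6 := by decide
  have l8 : ("termo".toList).length = 5 := by decide
  have l9 : ("flask".toList).length = 5 := by decide
  have l10 : ("tumbler".toList).length = 7 := by decide
  have l11 : ("device".toList).length = 6 := by decide
  have l12 : ("gadget".toList).length = 6 := by decide
  have l13 : ("tech".toList).length = 4 := by decide
  have l14 : ("kitchen".toList).length = 7 := by decide
  have l15 : ("cooking".toList).length = 7 := by decide
  have l16 : ("cocina".toList).length = 6 := by decide
  have hT : ∀ (bb : Bool) (r : Nat), (if bb = true then some r else none) = pvT bb r :=
    fun _ _ => rfl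
  rw [pvScan_eq, hku]
  simp only [hget]
  simp only [pvProductItems, pvProductLens, List.map_cons, List.map_nil,
    pvMinlist_cons, pvMinlist_nil, pvOmin_none_right, pvIf_omin, pvIf_if,
    pvMinlist_map_omin, pvMinlist_map_if, h4, h5, h6, h7, h10,
    l1, l2, l3, l4, l5, l6, l7, l8, l9, l10, l11, l12, l13, l14, l15, l16]
  norm_num
  simp only [pvOmin_none_left, pvOmin_none_right, hT]
  letI : Std.Associative pvOmin := ⟨pvOmin_assoc⟩
  letI : Std.Commutative pvOmin := ⟨pvOmin_comm⟩
  ac_rfl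

theorem pvScan_cat_char (t : List Char) (b : Option Nat) :
    pvScan t pvCategoryKW pvCategoryLens b
      = pvOmin (pvT (PySem.Chars.isIn "electronic".toList t) 3)
          (pvOmin (pvT (PySem.Chars.isIn "kitchen".toList t) 4) b) := by
  have hku : pvCategoryKW = PySem.Dict.mk pvCategoryItems := by decide
  have hget := fun s => pvGet?_minlist pvCategoryItems (by decide) s
  have h7 := fun kw r => pvOcc_term_reduce kw 7 t r (by norm_num)
  have h10 := fun kw r => pvOcc_term_reduce kw 10 t r (by norm_num)
  have l1 : ("electronic".toList).length = 10 := by decide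
  have l2 : ("kitchen".toList).length = 7 := by decide
  have hT : ∀ (bb : Bool) (r : Nat), (if bb = true then some r else none) = pvT bb r :=
    fun _ _ => rfl
  rw [pvScan_eq, hku]
  simp only [hget]
  simp only [pvCategoryItems, pvCategoryLens, List.map_cons, List.map_nil,
    pvMinlist_cons, pvMinlist_nil, pvOmin_none_right, pvIf_omin, pvIf_if,
    pvMinlist_map_omin, pvMinlist_map_if, h7, h10, l1, l2]
  norm_num
  simp only [pvOmin_none_left, pvOmin_none_right, hT]
  letI : Std.Associative pvOmin := ⟨pvOmin_assoc⟩
  letI : Std.Commutative pvOmin := ⟨pvOmin_comm⟩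
  ac_rfl

theorem pvGroup2' (a b : Bool) (r : Nat) (x : Option Nat) :
    pvOmin (pvT a r) (pvOmin (pvT b r) x) = pvOmin (pvT (a || b) r) x := by
  rw [← pvOmin_assoc, pvGroup2]

theorem pvFinal7 (e k m0 m1 m2 p3 p4 : Bool) :
    pvOmin (pvT e 3) (pvOmin (pvT k 4)
      (pvOmin (pvT m0 0) (pvOmin (pvT m1 1) (pvOmin (pvT m2 2) (pvOmin (pvT p3 3) (pvT p4 4))))))
      = if m0 then some 0 else if m1 then some 1 else if m2 then some 2
        else if e || p3 then some 3 else if k || p4 then some 4 else none := by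
  cases e <;> cases k <;> cases m0 <;> cases m1 <;> cases m2 <;> cases p3 <;> cases p4 <;> decide

-- ===== VERDICT (by name: the statement is the Claim_ definition above) =====
theorem get_product_specific_terms_py_spec : Claim_equal_get_product_specific_terms_py := by
  intro pn cat _
  unfold Spec_get_product_specific_terms_py get_product_specific_terms_py
    get_product_specific_terms_py_alt
  simp only [pvScan_prod_char, pvScan_cat_char, pvOmin_none_right]
  simp only [pvGroup2', pvGroup2]
  simp only [pvFinal7]
  simp only [List.any_cons, List.any_nil, Bool.or_false, PySem.Str.isIn_eq, List.nil_append]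
  split_ifs <;> simp [pvRuleSuffixes]
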